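-- pv_equiv track=rewrite | github.com/pypi-data/pypi-mirror-381 | packages/fastapi-qengine/fastapi_qengine-0.5.0-py3-none-any.whl/fastapi_qengine/core/parser.py | _parse_nested_key
-- ===== SOURCE A (Python) =====
-- def _parse_nested_key(key: str) -> list:
--     """
--     Parse a nested key like 'filter[where][price][$gt]' into parts.
--
--     Returns:
--         List of key parts like ['filter', 'where', 'price', '$gt']
--     """
--     parts = []
--     current = ""
--
--     for char in key:
--         if char in ["[", "]"]:
--             if current:
--                 parts.append(current)
--                 current = ""
--         else:
--             current += char
--
--     if current:
--         parts.append(current)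
--
--     return parts
-- ===== SOURCE B (Python) =====
-- import re
--
-- def _parse_nested_key(key: str) -> list:
--     """Parse 'filter[where][price][$gt]' into ['filter','where','price','$gt']."""
--     return re.findall(r'[^\[\]]+', key)
-- ===== Notes on version B (the rewrite author's own statement) =====
-- stated objective: idiomatic
-- what changed: The char-by-char accumulator state machine is replaced by a single regex findall of maximal runs of non-bracket characters.
import Mathlib
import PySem

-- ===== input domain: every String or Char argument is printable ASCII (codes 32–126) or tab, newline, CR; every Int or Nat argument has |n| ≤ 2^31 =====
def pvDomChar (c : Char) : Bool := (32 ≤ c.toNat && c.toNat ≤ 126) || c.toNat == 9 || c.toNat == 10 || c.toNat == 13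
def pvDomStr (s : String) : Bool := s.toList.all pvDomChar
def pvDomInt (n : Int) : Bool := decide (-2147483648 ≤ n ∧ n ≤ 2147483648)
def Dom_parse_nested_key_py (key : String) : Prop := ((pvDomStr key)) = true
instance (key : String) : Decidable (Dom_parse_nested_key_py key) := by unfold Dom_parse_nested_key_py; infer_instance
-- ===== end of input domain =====

-- B replaces A's char-by-char accumulator state machine with one pattern-matching pass
-- (regex findall of maximal non-bracket runs, ported as splitOnP + drop empty chunks); objective: idiomatic.

-- ===== PORT A =====
-- A's loop body: 'if char in ["[","]"]: flush current else current += char'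
def pvStepA (st : List String × List Char) (c : Char) : List String × List Char :=
  if c = '[' ∨ c = ']' then
    if st.2 ≠ [] then (st.1 ++ [String.mk st.2], []) else st
  else (st.1, st.2 ++ [c])

def parse_nested_key_py (key : String) : List String :=
  let st := key.toList.foldl pvStepA ([], [])
  if st.2 ≠ [] then st.1 ++ [String.mk st.2] else st.1

-- ===== PORT B =====
-- re.findall(r'[^\[\]]+', key): maximal runs of non-bracket chars = the non-empty chunks
-- of splitting the char list at brackets.
def pvBracket (c : Char) : Bool := c = '[' || c = ']'

def parse_nested_key_py_alt (key : String) : List String :=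
  ((key.toList.splitOnP pvBracket).filter (· ≠ [])).map String.mk

-- ===== PRECONDITION & SPEC =====
def Spec_parse_nested_key_py (key : String) (out : List String) : Prop := out = parse_nested_key_py_alt key
instance (key : String) (out : List String) : Decidable (Spec_parse_nested_key_py key out) := by unfold Spec_parse_nested_key_py; infer_instance

-- ===== CLAIM (what is proved, stated in full; the proofs are below) =====
def Claim_equal_parse_nested_key_py : Prop := ∀ (key : String), Dom_parse_nested_key_py key → Spec_parse_nested_key_py key (parse_nested_key_py key)

-- ===== LEMMAS AND PROOFS =====

-- A's final flush, as a function of the loop state.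
def pvFinish (st : List String × List Char) : List String :=
  if st.2 ≠ [] then st.1 ++ [String.mk st.2] else st.1

-- B's value on a char list.
def pvChunks (l : List Char) : List String :=
  ((l.splitOnP pvBracket).filter (· ≠ [])).map String.mk

theorem pvChunks_single (cur : List Char) (h : ∀ c ∈ cur, pvBracket c = false) :
    pvChunks cur = if cur ≠ [] then [String.mk cur] else [] := by
  unfold pvChunks
  rw [List.splitOnP_eq_single pvBracket cur (by simpa using h)]
  by_cases hc : cur = [] <;> simp [hc]

theorem pvChunks_sep (cur : List Char) (c : Char) (cs : List Char)
    (h : ∀ x ∈ cur, pvBracket x = false) (hc : pvBracket c = true) :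
    pvChunks (cur ++ c :: cs) = (if cur ≠ [] then [String.mk cur] else []) ++ pvChunks cs := by
  unfold pvChunks
  rw [List.splitOnP_append_cons pvBracket cur cs c hc, List.splitOnP_eq_single pvBracket cur (by simpa using h)]
  by_cases hcur : cur = [] <;> simp [hcur]

theorem pvLoop_eq (l : List Char) :
    ∀ (parts : List String) (cur : List Char), (∀ c ∈ cur, pvBracket c = false) →
    pvFinish (l.foldl pvStepA (parts, cur)) = parts ++ pvChunks (cur ++ l) := by
  induction l with
  | nil =>
    intro parts cur h
    simp only [List.foldl_nil, List.append_nil, pvChunks_single cur h, pvFinish]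
    by_cases hc : cur = [] <;> simp [hc]
  | cons c cs ih =>
    intro parts cur h
    by_cases hb : c = '[' ∨ c = ']'
    · have hbb : pvBracket c = true := by
        rcases hb with hb | hb <;> simp [pvBracket, hb]
      rw [List.foldl_cons]
      have hstep : pvStepA (parts, cur) c
          = ((if cur ≠ [] then parts ++ [String.mk cur] else parts), []) := by
        simp only [pvStepA, if_pos hb]
        by_cases hc : cur = [] <;> simp [hc]
      rw [hstep, ih _ [] (by simp), pvChunks_sep cur c cs h hbb]
      by_cases hc : cur = [] <;> simp [hc]
    · have hbb : pvBracket c = false := by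
        simp only [pvBracket]
        rcases not_or.mp hb with ⟨h1, h2⟩
        simp [h1, h2]
      rw [List.foldl_cons]
      have hstep : pvStepA (parts, cur) c = (parts, cur ++ [c]) := by
        simp [pvStepA, hb]
      rw [hstep, ih _ (cur ++ [c])
        (by intro x hx; rcases List.mem_append.mp hx with hx | hx
            · exact h x hx
            · simp at hx; simpa [hx] using hbb)]
      simp

-- ===== VERDICT (by name: the statement is the Claim_ definition above) =====
theorem parse_nested_key_py_spec : Claim_equal_parse_nested_key_py := by
  intro key _
  show parse_nested_key_py key = parse_nested_key_py_alt key
  have := pvLoop_eq key.toList [] [] (by simp)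
  simpa [pvFinish, pvChunks, parse_nested_key_py, parse_nested_key_py_alt] using this
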